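-- pv_equiv track=rewrite | github.com/fredoflynn/mystery-word | demon_words.py | create_word_families
-- ===== SOURCE A (Python) =====
-- def create_word_families(list_of_words, cur_guess, guess_li):
--     """Creates word families.
--     Args -- List of words, current guess i.e. 's', and list of letters already guessed
--     Return -- Dictionary of word families with family as the key, and list of words as the value
--             e.g. list_of_words = ['SPOT', 'BANG', 'STAR'], cur_guess = 'S', guess_li = []
--             return_dict = {'S---': ['SPOT', 'STAR'], '----': ['BANG']
--     """
--     word_families1 = {}
--     for word in list_of_words:
--         word_family = ""
--         for letter in word:
--             if letter == cur_guess or letter in guess_li: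
--                 word_family += letter
--             else:
--                 word_family += "-"
--
--         # if word_family doesn't exist yet, Create it
--         if word_family not in word_families1:
--             word_families1[word_family] = []
--
--         word_families1[word_family].append(word)
--     return word_families1
-- ===== SOURCE B (Python) =====
-- def create_word_families(list_of_words, cur_guess, guess_li):
--     keep = set(guess_li)
--     keep.add(cur_guess)
--     pairs = [("".join(c if c in keep else "-" for c in w), w) for w in list_of_words]
--     families = list(dict.fromkeys(p for p, _ in pairs))
--     return {p: [w for q, w in pairs if q == p] for p in families}
-- ===== Notes on version B (the rewrite author's own statement) =====
-- stated objective: alternative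
-- what changed: Replaces A's single-pass dict accumulation with a map to (pattern, word) pairs, an ordered dedup of the patterns (dict.fromkeys), and one filter pass per family; no dict is mutated while scanning.
import Mathlib
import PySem

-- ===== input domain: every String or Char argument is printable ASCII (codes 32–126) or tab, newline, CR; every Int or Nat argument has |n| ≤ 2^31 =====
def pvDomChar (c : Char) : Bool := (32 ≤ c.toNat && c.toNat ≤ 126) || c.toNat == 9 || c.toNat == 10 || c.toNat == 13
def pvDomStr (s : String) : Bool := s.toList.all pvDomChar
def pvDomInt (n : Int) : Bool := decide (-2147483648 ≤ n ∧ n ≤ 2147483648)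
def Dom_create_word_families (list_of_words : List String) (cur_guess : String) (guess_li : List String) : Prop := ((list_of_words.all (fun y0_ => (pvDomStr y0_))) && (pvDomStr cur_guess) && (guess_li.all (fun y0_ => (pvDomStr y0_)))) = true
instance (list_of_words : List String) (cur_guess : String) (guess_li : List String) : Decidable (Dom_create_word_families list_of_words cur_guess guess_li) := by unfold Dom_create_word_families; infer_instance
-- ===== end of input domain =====

-- B replaces A's single-pass dict accumulation with map-to-pairs + ordered dedup of patterns + one filter per family (alternative decomposition, same results).


-- ===== PORT A =====
-- inner loop of A: 'letter == cur_guess' compares the one-char string of the letter with cur_guess;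
-- 'letter in guess_li' is list membership of that one-char string
def pvFamA (cur_guess : String) (guess_li : List String) (word : String) : String :=
  String.ofList (word.toList.foldl
    (fun acc letter =>
      if String.ofList [letter] == cur_guess || guess_li.contains (String.ofList [letter]) then
        acc ++ [letter]
      else
        acc ++ ['-'])
    [])

def create_word_families (list_of_words : List String) (cur_guess : String) (guess_li : List String) : List (String × List String) :=
  (list_of_words.foldl
    (fun word_families1 word =>
      let word_family := pvFamA cur_guess guess_li word
      let word_families1 :=
        if word_families1.contains word_family then word_families1
        else word_families1.insert word_family []
      word_families1.modify word_family [] (fun l => l ++ [word]))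
    PySem.Dict.empty).items

-- ===== PORT B =====
-- Source B's pattern: keep a letter iff its one-char string is in the set keep = set(guess_li) | {cur_guess}
def pvFamB (keep : PySem.Set String) (w : String) : String :=
  String.ofList (w.toList.map (fun c => if PySem.Set.contains keep (String.ofList [c]) then c else '-'))

def create_word_families_alt (list_of_words : List String) (cur_guess : String) (guess_li : List String) : List (String × List String) :=
  let keep := PySem.Set.add (PySem.Set.ofList guess_li) cur_guess
  let pairs := list_of_words.map (fun w => (pvFamB keep w, w))
  let families := PySem.List.dedup (pairs.map (·.1))
  families.map (fun p => (p, (pairs.filter (fun q => q.1 == p)).map (·.2)))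

-- ===== PRECONDITION & SPEC =====
def Spec_create_word_families (list_of_words : List String) (cur_guess : String) (guess_li : List String) (out : List (String × List String)) : Prop := out = create_word_families_alt list_of_words cur_guess guess_li
instance (list_of_words : List String) (cur_guess : String) (guess_li : List String) (out : List (String × List String)) : Decidable (Spec_create_word_families list_of_words cur_guess guess_li out) := by unfold Spec_create_word_families; infer_instance

-- ===== CLAIM (what is proved, stated in full; the proofs are below) =====
def Claim_equal_create_word_families : Prop := ∀ (list_of_words : List String) (cur_guess : String) (guess_li : List String), Dom_create_word_families list_of_words cur_guess guess_li → Spec_create_word_families list_of_words cur_guess guess_li (create_word_families list_of_words cur_guess guess_li)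

-- ===== LEMMAS AND PROOFS =====

-- the two per-word pattern builders agree
lemma fam_eq (cg : String) (gl : List String) :
    pvFamB (PySem.Set.add (PySem.Set.ofList gl) cg) = pvFamA cg gl := by
  funext w
  unfold pvFamA pvFamB
  have hbody : (fun (acc : List Char) letter =>
      if String.ofList [letter] == cg || gl.contains (String.ofList [letter]) then
        acc ++ [letter] else acc ++ ['-'])
      = fun acc letter => acc ++ [if String.ofList [letter] == cg || gl.contains (String.ofList [letter]) then letter else '-'] := by
    funext acc c; split <;> rfl
  rw [hbody, PySem.List.foldl_append_singleton_eq_map, List.nil_append]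
  congr 1
  apply List.map_congr_left
  intro c _
  have hc : PySem.Set.contains (PySem.Set.add (PySem.Set.ofList gl) cg) (String.ofList [c])
      = (String.ofList [c] == cg || gl.contains (String.ofList [c])) := by
    simp [PySem.Set.contains, PySem.Set.mem_add, PySem.Set.mem_ofList, Bool.or_comm, beq_eq_decide]
  rw [hc]

-- A's "create empty entry if missing, then append" is one Dict.modify
lemma step_eq (d : PySem.Dict String (List String)) (f w : String) :
    (if d.contains f then d else d.insert f []).modify f [] (fun l => l ++ [w])
      = d.modify f [] (fun l => l ++ [w]) := by
  by_cases h : d.contains f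
  · simp [h]
  · simp only [h, Bool.false_eq_true, if_false, PySem.Dict.modify,
      PySem.Dict.getD_insert_self, PySem.Dict.insert_insert_self,
      PySem.Dict.getD_of_not_contains _ _ (by simpa using h)]

-- ===== VERDICT (by name: the statement is the Claim_ definition above) =====
theorem create_word_families_spec : Claim_equal_create_word_families := by
  intro words cg gl _
  unfold Spec_create_word_families
  simp only [create_word_families, create_word_families_alt]
  rw [fam_eq]
  have h1 : (fun (d : PySem.Dict String (List String)) word =>
      let word_family := pvFamA cg gl word
      let d' := if d.contains word_family then d else d.insert word_family []
      d'.modify word_family [] (fun l => l ++ [word]))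
      = fun d p => d.modify (pvFamA cg gl p) [] (fun l => l ++ [p]) := by
    funext d w; exact step_eq d (pvFamA cg gl w) w
  rw [h1]
  have h2 : words.foldl (fun d p => d.modify (pvFamA cg gl p) [] (fun l => l ++ [p])) PySem.Dict.empty
      = (words.map (fun w => (pvFamA cg gl w, w))).foldl
          (fun d p => d.modify p.1 [] (fun l => l ++ [p.2])) PySem.Dict.empty := by
    rw [List.foldl_map]
  rw [h2]
  set pairs := words.map (fun w => (pvFamA cg gl w, w)) with hp
  have hnd : ((pairs.foldl (fun d p => d.modify p.1 [] (fun l => l ++ [p.2])) PySem.Dict.empty)).keys.Nodup :=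
    PySem.Dict.nodup_keys_foldl_modify_key pairs Prod.fst [] (fun _ p l => l ++ [p.2]) _ (by simp)
  rw [PySem.Dict.items_eq_map_keys _ hnd []]
  have hk : ((pairs.foldl (fun d p => d.modify p.1 [] (fun l => l ++ [p.2])) PySem.Dict.empty)).keys
      = PySem.List.dedup (pairs.map (·.1)) := by
    rw [PySem.Dict.keys_foldl_modify_key pairs Prod.fst [] (fun _ p l => l ++ [p.2]) PySem.Dict.empty]
    rw [PySem.List.dedup_eq_ofList]
    rfl
  rw [hk]
  apply List.map_congr_left
  intro k _
  rw [PySem.Dict.getD_foldl_modify_append pairs PySem.Dict.empty k]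
  simp [PySem.Dict.getD_empty]
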